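-- pv_equiv track=rewrite | github.com/EkaBond/Module_2_hard | Module_hard.py | your_password
-- ===== SOURCE A (Python) =====
-- def your_password(num):
--     result_ = []
--     for i in range(1, num):
--         for j in range(i + 1, num):
--             if i == j:
--                 continue
--             if num % (i + j)  == 0:
--                 result_.extend([i, j])
--     return result_
-- ===== SOURCE B (Python) =====
-- def your_password(num):
--     # precompute the divisors of num once; each valid pair corresponds to
--     # a divisor d of num with d - i > i (then j = d - i is in range automatically)
--     divs = [d for d in range(1, num + 1) if num % d == 0]
--     result_ = []
--     for i in range(1, num):
--         for d in divs:
--             if d > 2 * i: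
--                 result_.extend([i, d - i])
--     return result_
-- ===== Notes on version B (the rewrite author's own statement) =====
-- stated objective: faster
-- what changed: instead of testing every candidate pair with a quadratic double loop, B precomputes the divisors of num once and, for each first component i, emits the pair obtained from each large-enough divisor
import Mathlib
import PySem

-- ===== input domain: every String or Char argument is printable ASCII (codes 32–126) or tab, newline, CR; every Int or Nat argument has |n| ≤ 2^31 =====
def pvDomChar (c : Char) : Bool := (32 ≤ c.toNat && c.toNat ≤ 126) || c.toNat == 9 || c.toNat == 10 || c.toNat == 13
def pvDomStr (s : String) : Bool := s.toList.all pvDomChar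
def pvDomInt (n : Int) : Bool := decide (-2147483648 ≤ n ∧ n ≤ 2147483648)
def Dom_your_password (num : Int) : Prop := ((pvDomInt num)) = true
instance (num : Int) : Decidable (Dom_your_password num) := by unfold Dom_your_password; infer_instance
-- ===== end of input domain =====

-- B replaces A's quadratic pair scan by precomputing the divisors of num once; asymptotically faster.

-- ===== PORT A =====
def your_password (num : Int) : List Int :=
  (PySem.List.pyRange 1 num 1).foldl (fun result_ i =>
    (PySem.List.pyRange (i + 1) num 1).foldl (fun result_ j =>
      if i == j then result_
      else if PySem.Int.mod num (i + j) == 0 then result_ ++ [i, j]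
      else result_) result_) []

-- ===== PORT B =====
def your_password_alt (num : Int) : List Int :=
  let divs := (PySem.List.pyRange 1 (num + 1) 1).filter (fun d => PySem.Int.mod num d == 0)
  (PySem.List.pyRange 1 num 1).foldl (fun result_ i =>
    divs.foldl (fun result_ d =>
      if d > 2 * i then result_ ++ [i, d - i] else result_) result_) []

-- ===== PRECONDITION & SPEC =====
def Spec_your_password (num : Int) (out : List Int) : Prop := out = your_password_alt num
instance (num : Int) (out : List Int) : Decidable (Spec_your_password num out) := by unfold Spec_your_password; infer_instance

-- ===== CLAIM (what is proved, stated in full; the proofs are below) =====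
def Claim_equal_your_password : Prop := ∀ (num : Int), Dom_your_password num → Spec_your_password num (your_password num)

-- ===== LEMMAS AND PROOFS =====

theorem pv_flatMap_congr_mem {α β : Type} (l : List α) (f g : α → List β)
    (h : ∀ x ∈ l, f x = g x) : l.flatMap f = l.flatMap g := by
  induction l with
  | nil => rfl
  | cons a t ih =>
    simp only [List.flatMap_cons]
    rw [h a (by simp), ih (fun x hx => h x (by simp [hx]))]

theorem pv_flatMap_filter {α β : Type} (l : List α) (p : α → Bool) (g : α → List β) :
    (l.filter p).flatMap g = l.flatMap (fun x => if p x then g x else []) := by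
  induction l with
  | nil => rfl
  | cons a t ih =>
    by_cases h : p a <;> simp [h, ih]

theorem pv_pyRange_shift (a b c : Int) :
    (PySem.List.pyRange a b 1).map (fun x => x + c) = PySem.List.pyRange (a + c) (b + c) 1 := by
  rw [PySem.List.pyRange_one, PySem.List.pyRange_one, List.map_map]
  have h : b + c - (a + c) = b - a := by ring
  rw [h]
  exact List.map_congr_left (fun k _ => by simp [Function.comp]; ring)

theorem pv_trim_left {β : Type} (g : Int → List β) (a a' b : Int) (h1 : a ≤ a')
    (h0 : ∀ d, a ≤ d → d < a' → g d = []) :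
    (PySem.List.pyRange a b 1).flatMap g = (PySem.List.pyRange a' b 1).flatMap g := by
  have hn : ∀ n : Nat, ∀ a : Int, (a' - a).toNat = n → a ≤ a' →
      (∀ d, a ≤ d → d < a' → g d = []) →
      (PySem.List.pyRange a b 1).flatMap g = (PySem.List.pyRange a' b 1).flatMap g := by
    intro n
    induction n with
    | zero =>
      intro a hn0 hle _
      have heq : a = a' := by omega
      subst heq
      rfl
    | succ m ih =>
      intro a hn0 hle h0
      have hlt : a < a' := by omega
      by_cases hb : b ≤ a
      · rw [PySem.List.pyRange_one_eq_nil hb, PySem.List.pyRange_one_eq_nil (by omega)]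
      · rw [PySem.List.pyRange_one_cons (by omega)]
        simp only [List.flatMap_cons, h0 a le_rfl hlt, List.nil_append]
        exact ih (a + 1) (by omega) (by omega) (fun d hd1 hd2 => h0 d (by omega) hd2)
  exact hn (a' - a).toNat a rfl h1 h0

theorem pv_trim_right {β : Type} (g : Int → List β) (a b b' : Int) (h1 : b' ≤ b)
    (h0 : ∀ d, b' ≤ d → d < b → g d = []) :
    (PySem.List.pyRange a b 1).flatMap g = (PySem.List.pyRange a b' 1).flatMap g := by
  have hn : ∀ n : Nat, ∀ b : Int, (b - b').toNat = n → b' ≤ b →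
      (∀ d, b' ≤ d → d < b → g d = []) →
      (PySem.List.pyRange a b 1).flatMap g = (PySem.List.pyRange a b' 1).flatMap g := by
    intro n
    induction n with
    | zero =>
      intro b hn0 hle _
      have heq : b = b' := by omega
      subst heq
      rfl
    | succ m ih =>
      intro b hn0 hle h0
      have hlt : b' < b := by omega
      by_cases hb : b ≤ a
      · rw [PySem.List.pyRange_one_eq_nil hb, PySem.List.pyRange_one_eq_nil (by omega)]
      · have hsplit : PySem.List.pyRange a b 1 = PySem.List.pyRange a (b - 1) 1 ++ [b - 1] := by
          have := PySem.List.pyRange_one_succ_right (a := a) (b := b - 1) (by omega)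
          simpa using this
        rw [hsplit]
        simp only [List.flatMap_append, List.flatMap_cons, List.flatMap_nil,
          h0 (b - 1) (by omega) (by omega), List.append_nil]
        exact ih (b - 1) (by omega) (by omega) (fun d hd1 hd2 => h0 d hd1 (by omega))
  exact hn (b - b').toNat b rfl h1 h0

-- A's result, as a flatMap of per-i pair lists
theorem pv_A_flatMap (num : Int) :
    your_password num = (PySem.List.pyRange 1 num 1).flatMap (fun i =>
      (PySem.List.pyRange (i + 1) num 1).flatMap (fun j =>
        if PySem.Int.mod num (i + j) == 0 then [i, j] else [])) := by
  unfold your_password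
  rw [PySem.List.foldl_congr_mem (g := fun acc i => acc ++
      (PySem.List.pyRange (i + 1) num 1).flatMap (fun j =>
        if PySem.Int.mod num (i + j) == 0 then [i, j] else []))]
  · rw [PySem.List.foldl_append_eq_flatMap]; simp
  · intro acc i _
    rw [PySem.List.foldl_congr_mem (g := fun acc j => acc ++
        (if PySem.Int.mod num (i + j) == 0 then [i, j] else []))]
    · rw [PySem.List.foldl_append_eq_flatMap]
    · intro acc' j hj
      rw [PySem.List.mem_pyRange_one] at hj
      have hne : (i == j) = false := by simp; omega
      simp only [hne, Bool.false_eq_true, if_false]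
      split <;> simp

-- B's result, as a flatMap over the divisor-filtered range
theorem pv_B_flatMap (num : Int) :
    your_password_alt num = (PySem.List.pyRange 1 num 1).flatMap (fun i =>
      (PySem.List.pyRange 1 (num + 1) 1).flatMap (fun d =>
        if (PySem.Int.mod num d == 0) then (if d > 2 * i then [i, d - i] else []) else [])) := by
  unfold your_password_alt
  simp only []
  rw [PySem.List.foldl_congr_mem (g := fun acc i => acc ++
      (((PySem.List.pyRange 1 (num + 1) 1).filter (fun d => PySem.Int.mod num d == 0)).flatMap
        (fun d => if d > 2 * i then [i, d - i] else [])))]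
  · rw [PySem.List.foldl_append_eq_flatMap]
    simp only [List.nil_append]
    exact pv_flatMap_congr_mem _ _ _ (fun i _ => pv_flatMap_filter _ _ _)
  · intro acc i _
    rw [PySem.List.foldl_congr_mem (g := fun acc d => acc ++
        (if d > 2 * i then [i, d - i] else []))]
    · rw [PySem.List.foldl_append_eq_flatMap]
    · intro acc' d _; split <;> simp

-- per-i equality of the two inner lists
theorem pv_inner_eq (num i : Int) (hi : 1 ≤ i) (hin : i < num) :
    (PySem.List.pyRange (i + 1) num 1).flatMap (fun j =>
        if PySem.Int.mod num (i + j) == 0 then [i, j] else []) =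
    (PySem.List.pyRange 1 (num + 1) 1).flatMap (fun d =>
        if (PySem.Int.mod num d == 0) then (if d > 2 * i then [i, d - i] else []) else []) := by
  have hnum : 2 ≤ num := by omega
  -- reindex A's inner loop by d = j + i
  have hA : (PySem.List.pyRange (i + 1) num 1).flatMap (fun j =>
        if PySem.Int.mod num (i + j) == 0 then [i, j] else []) =
      (PySem.List.pyRange (i + 1 + i) (num + i) 1).flatMap (fun d =>
        if PySem.Int.mod num d == 0 then [i, d - i] else []) := by
    rw [← pv_pyRange_shift (i + 1) num i, List.flatMap_map]
    refine pv_flatMap_congr_mem _ _ _ (fun j _ => ?_)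
    have h1 : i + j = j + i := by ring
    have h2 : j + i - i = j := by ring
    simp [h1, h2]
  rw [hA, show i + 1 + i = 2 * i + 1 by ring]
  -- trim A's range down to (2i+1, num+1): beyond num, d does not divide num
  have hAtrim := pv_trim_right (a := 2 * i + 1) (b := num + i) (b' := num + 1)
      (g := fun d => if PySem.Int.mod num d == 0 then [i, d - i] else [])
      (by omega)
      (by
        intro d hd1 hd2
        have hdpos : (0 : Int) < d := by omega
        have hmod : PySem.Int.mod num d = num := by
          rw [PySem.Int.mod_eq_emod_of_pos hdpos]
          exact Int.emod_eq_of_lt (by omega) (by omega)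
        simp [hmod]; omega)
  rw [hAtrim]
  -- trim B's range up from 1 to 2i+1: below that, d > 2i is false
  have hBtrim := pv_trim_left (a := 1) (a' := 2 * i + 1) (b := num + 1)
      (g := fun d => if (PySem.Int.mod num d == 0) then (if d > 2 * i then [i, d - i] else []) else [])
      (by omega)
      (by intro d hd1 hd2; simp only []; split
          · rw [if_neg (by omega)]
          · rfl)
  rw [hBtrim]
  refine pv_flatMap_congr_mem _ _ _ (fun d hd => ?_)
  rw [PySem.List.mem_pyRange_one] at hd
  split
  · rw [if_pos (by omega)]
  · rfl

-- ===== VERDICT (by name: the statement is the Claim_ definition above) =====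
theorem your_password_spec : Claim_equal_your_password := by
  intro num _
  unfold Spec_your_password
  rw [pv_A_flatMap, pv_B_flatMap]
  refine pv_flatMap_congr_mem _ _ _ (fun i hi => ?_)
  rw [PySem.List.mem_pyRange_one] at hi
  exact pv_inner_eq num i hi.1 hi.2
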